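-- pv_equiv track=rewrite | github.com/andreyfesunov/cp | python/codeforces/C. Факториалы и степени двойки.py | solve
-- ===== SOURCE A (Python) =====
-- def get_facts(x: int) -> list[int]:
--     facts = []
--
--     fact = 6
--     multiplier = 4
--
--     while fact <= x:
--         facts.append(fact)
--
--         fact *= multiplier
--         multiplier += 1
--
--     return facts
--
-- def popcount(x: int) -> int:
--     return bin(x).count("1")
--
-- def solve(x: int) -> int:
--     facts = get_facts(x)
--     facts_len = len(facts)
--     result = popcount(x)
--
--     for mask in range(1 << facts_len):
--         s = 0
--         cnt_mask = 0
--
--         for index in range(facts_len):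
--             if mask & (1 << index):
--                 s += facts[index]
--                 cnt_mask += 1
--
--         if s > x:
--             continue
--
--         result = min(result, cnt_mask + popcount(x - s))
--
--     return result
-- ===== SOURCE B (Python) =====
-- def get_facts(x: int) -> list[int]:
--     facts = []
--
--     fact = 6
--     multiplier = 4
--
--     while fact <= x:
--         facts.append(fact)
--
--         fact *= multiplier
--         multiplier += 1
--
--     return facts
--
-- def popcount(x: int) -> int:
--     return bin(x).count("1")
--
-- def solve(x: int) -> int:
--     facts = get_facts(x)
--     n = len(facts)
--
--     def rec(i: int, s: int, c: int, best: int) -> int: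
--         if i == n:
--             if s <= x:
--                 return min(best, c + popcount(x - s))
--             return best
--         best = rec(i + 1, s, c, best)
--         return rec(i + 1, s + facts[i], c + 1, best)
--
--     return rec(0, 0, 0, popcount(x))
-- ===== Notes on version B (the rewrite author's own statement) =====
-- stated objective: alternative
-- what changed: Replaced the bitmask enumeration (outer loop over all 2^m masks with an inner loop decoding each mask's bits) by a recursive include/exclude DFS over the factorial list that carries the running sum, running count and best result, so no mask decoding happens at all.
import Mathlib
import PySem

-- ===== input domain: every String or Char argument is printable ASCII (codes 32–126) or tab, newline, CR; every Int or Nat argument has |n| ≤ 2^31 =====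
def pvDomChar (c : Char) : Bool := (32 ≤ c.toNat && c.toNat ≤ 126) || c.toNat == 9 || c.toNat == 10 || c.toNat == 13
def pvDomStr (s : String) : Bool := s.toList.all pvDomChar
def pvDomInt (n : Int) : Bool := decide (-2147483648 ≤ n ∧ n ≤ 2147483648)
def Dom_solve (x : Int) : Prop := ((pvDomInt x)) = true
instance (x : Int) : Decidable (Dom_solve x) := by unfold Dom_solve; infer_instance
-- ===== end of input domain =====

-- B replaces A's bitmask enumeration of factorial subsets by a recursive include/exclude
-- DFS carrying the running sum, count and best result (alternative decomposition, same cost).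

-- ===== PORT A =====

-- bin(x).count("1"): bin renders '-0b…' for negatives and counts the one bits of |x|,
-- which is exactly PySem.Int.bitCount (Python-exact on negatives).
def popcount (x : Int) : Int := (PySem.Int.bitCount x : Int)

-- while fact <= x: … ; hypotheses 0 < fact, 2 ≤ mult only justify termination.
def getFactsAux (x fact mult : Int) (hf : 0 < fact) (hm : 2 ≤ mult) : List Int :=
  if h : fact ≤ x then
    fact :: getFactsAux x (fact * mult) (mult + 1)
      (mul_pos hf (lt_of_lt_of_le (by norm_num) hm)) (by omega)
  else []
termination_by (x + 1 - fact).toNat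
decreasing_by
  have h2 : fact * 2 ≤ fact * mult := mul_le_mul_of_nonneg_left hm hf.le
  omega

def getFacts (x : Int) : List Int := getFactsAux x 6 4 (by norm_num) (by norm_num)

-- masks are the nonnegative ints range(1 << facts_len): ported as Nat; 'mask & (1 << index)'
-- nonzero is exactly Nat.testBit mask index.
def solve (x : Int) : Int :=
  let facts := getFacts x
  let factsLen := facts.length
  let result := popcount x
  (List.range (2 ^ factsLen)).foldl
    (fun result mask =>
      let sc := (List.range factsLen).foldl
        (fun sc index =>
          if mask.testBit index then
            (sc.1 + (PySem.List.pyGet? facts (index : Int)).getD 0, sc.2 + 1)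
          else sc) ((0 : Int), (0 : Int))
      if sc.1 > x then result
      else min result (sc.2 + popcount (x - sc.1)))
    result

-- ===== PORT B =====

-- rec(i, s, c, best): structural recursion on the remaining suffix of facts.
def solveRec (x : Int) (facts : List Int) (s c best : Int) : Int :=
  match facts with
  | [] => if s ≤ x then min best (c + popcount (x - s)) else best
  | f :: rest =>
      let best1 := solveRec x rest s c best
      solveRec x rest (s + f) (c + 1) best1

def solve_alt (x : Int) : Int := solveRec x (getFacts x) 0 0 (popcount x)

-- ===== PRECONDITION & SPEC =====
def Spec_solve (x : Int) (out : Int) : Prop := out = solve_alt x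
instance (x : Int) (out : Int) : Decidable (Spec_solve x out) := by unfold Spec_solve; infer_instance

-- ===== CLAIM (what is proved, stated in full; the proofs are below) =====
def Claim_equal_solve : Prop := ∀ (x : Int), Dom_solve x → Spec_solve x (solve x)

-- ===== LEMMAS AND PROOFS =====

-- the common leaf step: fold 'best' with one subset's (sum, count) pair
def step (x : Int) (b : Int) (p : Int × Int) : Int :=
  if p.1 ≤ x then min b (p.2 + popcount (x - p.1)) else b

-- the leaves of B's DFS, in B's order
def leaves (facts : List Int) (s c : Int) : List (Int × Int) :=
  match facts with
  | [] => [(s, c)]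
  | f :: rest => leaves rest s c ++ leaves rest (s + f) (c + 1)

-- A's inner loop with generalized initial state
def sfold (facts : List Int) (mask : Nat) (s c : Int) : Int × Int :=
  (List.range facts.length).foldl
    (fun sc index =>
      if mask.testBit index then
        (sc.1 + (PySem.List.pyGet? facts (index : Int)).getD 0, sc.2 + 1)
      else sc) (s, c)

theorem step_left_comm (x b : Int) (p q : Int × Int) :
    step x (step x b p) q = step x (step x b q) p := by
  unfold step; split_ifs <;> simp [min_right_comm]

theorem solveRec_eq_foldl (x : Int) (facts : List Int) :
    ∀ s c best : Int, solveRec x facts s c best = (leaves facts s c).foldl (step x) best := by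
  induction facts with
  | nil => intro s c best; simp [solveRec, leaves, step]
  | cons f rest ih =>
      intro s c best
      simp [solveRec, leaves, List.foldl_append, ih]

theorem sfold_cons (f : Int) (r : List Int) (mask : Nat) (s c : Int) :
    sfold (f :: r) mask s c =
      sfold r (mask / 2) (if mask.testBit 0 then s + f else s)
        (if mask.testBit 0 then c + 1 else c) := by
  unfold sfold
  rw [show (f :: r).length = r.length + 1 from rfl, List.range_succ_eq_map,
      List.foldl_cons, List.foldl_map]
  have hbody : ∀ (sc : Int × Int) (i : Nat),
      (if (mask.testBit (i + 1)) then
        (sc.1 + (PySem.List.pyGet? (f :: r) ((i + 1 : Nat) : Int)).getD 0, sc.2 + 1)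
      else sc) =
      (if ((mask / 2).testBit i) then
        (sc.1 + (PySem.List.pyGet? r ((i : Nat) : Int)).getD 0, sc.2 + 1)
      else sc) := by
    intro sc i
    have ht : mask.testBit (i + 1) = (mask / 2).testBit i := by
      simp [Nat.testBit_add_one]
    have hg : PySem.List.pyGet? (f :: r) ((i + 1 : Nat) : Int) =
        PySem.List.pyGet? r ((i : Nat) : Int) := by
      simp [PySem.List.pyGet?_natCast]
    rw [ht, hg]
  have hstart : (if mask.testBit 0 then
      ((s + (PySem.List.pyGet? (f :: r) ((0 : Nat) : Int)).getD 0, c + 1) : Int × Int)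
    else (s, c)) = (if mask.testBit 0 then s + f else s, if mask.testBit 0 then c + 1 else c) := by
    split <;> simp
  simp only [Nat.succ_eq_add_one]
  rw [hstart]
  congr 1
  funext sc i
  exact hbody sc i

theorem range_even_odd (m : Nat) :
    (List.range (2 ^ (m + 1))).Perm
      ((List.range (2 ^ m)).map (fun k => 2 * k) ++
        (List.range (2 ^ m)).map (fun k => 2 * k + 1)) := by
  have h2 : ((List.range (2 ^ m)).map (fun k => 2 * k) ++
      (List.range (2 ^ m)).map (fun k => 2 * k + 1)).Nodup := by
    refine List.Nodup.append ?_ ?_ ?_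
    · exact List.nodup_range.map (fun a b h => by omega)
    · exact List.nodup_range.map (fun a b h => by omega)
    · intro a ha hb
      simp only [List.mem_map, List.mem_range] at ha hb
      omega
  rw [List.perm_ext_iff_of_nodup List.nodup_range h2]
  intro a
  simp only [List.mem_range, List.mem_append, List.mem_map, pow_succ]
  constructor
  · intro h
    rcases Nat.even_or_odd a with ⟨k, hk⟩ | ⟨k, hk⟩
    · exact Or.inl ⟨k, by omega, by omega⟩
    · exact Or.inr ⟨k, by omega, by omega⟩
  · rintro (⟨k, hk1, hk2⟩ | ⟨k, hk1, hk2⟩) <;> omega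

theorem sfold_even (r : List Int) (f s c : Int) (k : Nat) :
    sfold (f :: r) (2 * k) s c = sfold r k s c := by
  rw [sfold_cons]
  have h0 : (2 * k).testBit 0 = false := by simp [Nat.testBit_zero]
  have hd : 2 * k / 2 = k := by omega
  rw [h0, hd]; simp

theorem sfold_odd (r : List Int) (f s c : Int) (k : Nat) :
    sfold (f :: r) (2 * k + 1) s c = sfold r k (s + f) (c + 1) := by
  rw [sfold_cons]
  have h0 : (2 * k + 1).testBit 0 = true := by simp [Nat.testBit_zero]
  have hd : (2 * k + 1) / 2 = k := by omega
  rw [h0, hd]; simp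

theorem map_sfold_perm_leaves (facts : List Int) :
    ∀ s c : Int,
      List.Perm ((List.range (2 ^ facts.length)).map (fun mask => sfold facts mask s c))
        (leaves facts s c) := by
  induction facts with
  | nil =>
      intro s c
      simp [sfold, leaves]
  | cons f r ih =>
      intro s c
      have h1 : List.Perm ((List.range (2 ^ (f :: r).length)).map (fun mask => sfold (f :: r) mask s c))
          (((List.range (2 ^ r.length)).map (fun k => 2 * k) ++
            (List.range (2 ^ r.length)).map (fun k => 2 * k + 1)).map
            (fun mask => sfold (f :: r) mask s c)) :=
        (range_even_odd r.length).map _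
      refine h1.trans ?_
      rw [List.map_append, List.map_map, List.map_map]
      have he : (List.range (2 ^ r.length)).map ((fun mask => sfold (f :: r) mask s c) ∘ fun k => 2 * k) =
          (List.range (2 ^ r.length)).map (fun k => sfold r k s c) :=
        List.map_congr_left (fun k _ => sfold_even r f s c k)
      have ho : (List.range (2 ^ r.length)).map ((fun mask => sfold (f :: r) mask s c) ∘ fun k => 2 * k + 1) =
          (List.range (2 ^ r.length)).map (fun k => sfold r k (s + f) (c + 1)) :=
        List.map_congr_left (fun k _ => sfold_odd r f s c k)
      rw [he, ho]
      exact ((ih s c).append (ih (s + f) (c + 1)))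

theorem solve_eq (x : Int) : solve x = solve_alt x := by
  unfold solve solve_alt
  have hbody : ∀ (b : Int) (mask : Nat),
      (let sc := (List.range (getFacts x).length).foldl
        (fun sc index =>
          if mask.testBit index then
            (sc.1 + (PySem.List.pyGet? (getFacts x) (index : Int)).getD 0, sc.2 + 1)
          else sc) ((0 : Int), (0 : Int))
      if sc.1 > x then b
      else min b (sc.2 + popcount (x - sc.1))) = step x b (sfold (getFacts x) mask 0 0) := by
    intro b mask
    show (if (sfold (getFacts x) mask 0 0).1 > x then b
      else min b ((sfold (getFacts x) mask 0 0).2 + popcount (x - (sfold (getFacts x) mask 0 0).1))) = _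
    unfold step
    split_ifs <;> first | rfl | omega
  calc (List.range (2 ^ (getFacts x).length)).foldl
        (fun result mask =>
          let sc := (List.range (getFacts x).length).foldl
            (fun sc index =>
              if mask.testBit index then
                (sc.1 + (PySem.List.pyGet? (getFacts x) (index : Int)).getD 0, sc.2 + 1)
              else sc) ((0 : Int), (0 : Int))
          if sc.1 > x then result
          else min result (sc.2 + popcount (x - sc.1))) (popcount x)
      = (List.range (2 ^ (getFacts x).length)).foldl
          (fun b mask => step x b (sfold (getFacts x) mask 0 0)) (popcount x) := by
        exact PySem.List.foldl_congr_mem _ _ _ _ (fun b mask _ => hbody b mask)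
    _ = ((List.range (2 ^ (getFacts x).length)).map
          (fun mask => sfold (getFacts x) mask 0 0)).foldl (step x) (popcount x) := by
        rw [List.foldl_map]
    _ = (leaves (getFacts x) 0 0).foldl (step x) (popcount x) :=
        (map_sfold_perm_leaves (getFacts x) 0 0).foldl_eq' (fun p _ q _ b => step_left_comm x b p q) _
    _ = solveRec x (getFacts x) 0 0 (popcount x) := (solveRec_eq_foldl x (getFacts x) 0 0 (popcount x)).symm

-- ===== VERDICT (by name: the statement is the Claim_ definition above) =====
theorem solve_spec : Claim_equal_solve := by
  intro x _
  unfold Spec_solve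
  exact solve_eq x
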